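-- pv_equiv track=rewrite | github.com/RobDBennett/cs-module-project-hash-tables | applications/expensive_seq/expensive_seq.py | expensive_seq
-- ===== SOURCE A (Python) =====
-- cache = {}
--
-- def expensive_seq(x, y, z):
--     if (x,y,z) in cache:
--         return cache[(x,y,z)]
--     if x <= 0:
--        answer = y + z
--     else:
--         answer = expensive_seq(x-1, y+1, z) + expensive_seq(x-2, y+2, z*2) + expensive_seq(x-3, y+3, z*3)
--     cache[(x,y,z)] = answer
--     return answer
-- ===== SOURCE B (Python) =====
-- def expensive_seq(x, y, z):
--     # Linear DP over x on coefficient triples: result = a + b*y + c*z,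
--     # where (a, b, c) satisfy the recurrence induced by the three recursive calls.
--     a1 = a2 = a3 = 0
--     b1 = b2 = b3 = 1
--     c1 = c2 = c3 = 1
--     for _ in range(x):
--         a = a1 + b1 + a2 + 2 * b2 + a3 + 3 * b3
--         b = b1 + b2 + b3
--         c = c1 + 2 * c2 + 3 * c3
--         a1, a2, a3 = a, a1, a2
--         b1, b2, b3 = b, b1, b2
--         c1, c2, c3 = c, c1, c2
--     return a1 + b1 * y + c1 * z
-- ===== Notes on version B (the rewrite author's own statement) =====
-- stated objective: faster
-- what changed: Replaced the triple-branching memoized recursion with a single linear pass that maintains the coefficient triples (a,b,c) of the result's linear form a + b*y + c*z.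
import Mathlib
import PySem

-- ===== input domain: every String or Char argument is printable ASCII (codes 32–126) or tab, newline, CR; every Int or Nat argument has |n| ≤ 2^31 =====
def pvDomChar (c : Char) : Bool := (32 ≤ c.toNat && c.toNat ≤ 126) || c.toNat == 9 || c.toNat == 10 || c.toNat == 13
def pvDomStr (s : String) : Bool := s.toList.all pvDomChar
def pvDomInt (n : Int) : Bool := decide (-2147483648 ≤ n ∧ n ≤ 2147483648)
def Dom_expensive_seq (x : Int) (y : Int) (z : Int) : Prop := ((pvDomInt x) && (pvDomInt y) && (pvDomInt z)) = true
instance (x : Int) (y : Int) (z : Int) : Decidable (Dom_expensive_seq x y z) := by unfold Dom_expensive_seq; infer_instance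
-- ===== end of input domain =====

-- B replaces A's triple-branching memoized recursion by a linear coefficient DP (result = a + b*y + c*z); faster asymptotically.
-- A's memo cache is a module-level global; the port threads a cache that starts empty per call (the cached values are the same pure values, so the return value is unaffected).


-- ===== PORT A =====
-- Literal transliteration of A: cache lookup, base case, three recursive calls, cache store.
-- The cache is threaded through the calls in Python's evaluation order.
def pvGoA (x y z : Int) (c : Std.HashMap (Int × Int × Int) Int) :
    Int × Std.HashMap (Int × Int × Int) Int :=
  match getElem? c (x, y, z) with
  | some v => (v, c)                                -- if (x,y,z) in cache: return cache[(x,y,z)]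
  | none =>
    if hx : x ≤ 0 then
      let answer := y + z
      (answer, c.insert (x, y, z) answer)
    else
      let r1 := pvGoA (x-1) (y+1) z c
      let r2 := pvGoA (x-2) (y+2) (z*2) r1.2
      let r3 := pvGoA (x-3) (y+3) (z*3) r2.2
      let answer := r1.1 + r2.1 + r3.1
      (answer, r3.2.insert (x, y, z) answer)
termination_by x.toNat
decreasing_by all_goals omega

def expensive_seq (x : Int) (y : Int) (z : Int) : Int :=
  (pvGoA x y z ∅).1

-- ===== PORT B =====
-- Source B's loop state: the last three coefficient triples ((a1,b1,c1),(a2,b2,c2),(a3,b3,c3)),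
-- stepped once per loop iteration (structural recursion on the iteration count).
def pvCoeffs : Nat → (Int × Int × Int) × (Int × Int × Int) × (Int × Int × Int)
  | 0 => ((0,1,1),(0,1,1),(0,1,1))
  | n+1 =>
    let p := pvCoeffs n
    ((p.1.1 + p.1.2.1 + p.2.1.1 + 2*p.2.1.2.1 + p.2.2.1 + 3*p.2.2.2.1,
      p.1.2.1 + p.2.1.2.1 + p.2.2.2.1,
      p.1.2.2 + 2*p.2.1.2.2 + 3*p.2.2.2.2),
     p.1, p.2.1)

def expensive_seq_alt (x : Int) (y : Int) (z : Int) : Int :=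
  let t := (pvCoeffs x.toNat).1
  t.1 + t.2.1 * y + t.2.2 * z

-- ===== PRECONDITION & SPEC =====
-- A recurses x levels deep before the first base case, so for x ≥ 998 CPython's default
-- recursion limit makes A raise RecursionError; Pre_ excludes exactly those raising inputs.
def Pre_expensive_seq (x : Int) (y : Int) (z : Int) : Prop := x < 998
instance (x : Int) (y : Int) (z : Int) : Decidable (Pre_expensive_seq x y z) := by unfold Pre_expensive_seq; infer_instance
def pvWitness_expensive_seq : Int × Int × Int := (5, 1, 2)

def Spec_expensive_seq (x : Int) (y : Int) (z : Int) (out : Int) : Prop := out = expensive_seq_alt x y z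
instance (x : Int) (y : Int) (z : Int) (out : Int) : Decidable (Spec_expensive_seq x y z out) := by unfold Spec_expensive_seq; infer_instance

-- ===== CLAIM (what is proved, stated in full; the proofs are below) =====
def Claim_equal_expensive_seq : Prop := ∀ (x : Int) (y : Int) (z : Int), Dom_expensive_seq x y z → Pre_expensive_seq x y z → Spec_expensive_seq x y z (expensive_seq x y z)

-- ===== LEMMAS AND PROOFS =====

-- The second and third components of the DP state track the first at earlier indices.
lemma pvCoeffs_track (n : Nat) :
    (pvCoeffs n).2.1 = (pvCoeffs (n-1)).1 ∧ (pvCoeffs n).2.2 = (pvCoeffs (n-2)).1 := by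
  induction n with
  | zero => simp [pvCoeffs]
  | succ m ih =>
    refine ⟨by simp [pvCoeffs], ?_⟩
    show (pvCoeffs m).2.1 = _
    rw [ih.1, show m + 1 - 2 = m - 1 from rfl]

-- B's linear form satisfies A's recurrence.
lemma alt_rec (x y z : Int) (hx : ¬ x ≤ 0) :
    expensive_seq_alt x y z
      = expensive_seq_alt (x-1) (y+1) z + expensive_seq_alt (x-2) (y+2) (z*2)
        + expensive_seq_alt (x-3) (y+3) (z*3) := by
  obtain ⟨m, hm⟩ : ∃ m, x.toNat = m + 1 := ⟨x.toNat - 1, by omega⟩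
  have h1 : (x-1).toNat = m := by omega
  have h2 : (x-2).toNat = m - 1 := by omega
  have h3 : (x-3).toNat = m - 2 := by omega
  have h := pvCoeffs_track m
  simp only [expensive_seq_alt, hm, h1, h2, h3, pvCoeffs, ← h.1, ← h.2]
  ring

-- A cache is valid when every stored value is the (pure) value of the sequence there.
def pvValid (c : Std.HashMap (Int × Int × Int) Int) : Prop :=
  ∀ (p : Int × Int × Int) (v : Int), getElem? c p = some v → v = expensive_seq_alt p.1 p.2.1 p.2.2

lemma pvValid_insert {c : Std.HashMap (Int × Int × Int) Int} (hc : pvValid c)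
    (k : Int × Int × Int) {v : Int} (hv : v = expensive_seq_alt k.1 k.2.1 k.2.2) :
    pvValid (c.insert k v) := by
  intro p w hw
  rw [show getElem? (c.insert k v) p = (c.insert k v)[p]? from rfl, Std.HashMap.getElem?_insert] at hw
  split at hw
  · rename_i hpk; cases hw; rw [← eq_of_beq hpk]; exact hv
  · exact hc p w hw

-- The memoized recursion returns the linear form and preserves cache validity.
lemma pvGoA_spec (n : Nat) : ∀ (x y z : Int), x.toNat = n →
    ∀ c, pvValid c →
      (pvGoA x y z c).1 = expensive_seq_alt x y z ∧ pvValid (pvGoA x y z c).2 := by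
  induction n using Nat.strong_induction_on with
  | _ n ih =>
    intro x y z hn c hc
    rw [pvGoA]
    cases hget : getElem? c (x, y, z) with
    | some v => exact ⟨hc (x, y, z) v hget, hc⟩
    | none =>
      by_cases hx : x ≤ 0
      · simp only [dif_pos hx]
        have hval : y + z = expensive_seq_alt x y z := by
          have : x.toNat = 0 := by omega
          simp [expensive_seq_alt, this, pvCoeffs]
        exact ⟨hval, pvValid_insert hc (x, y, z) hval⟩
      · simp only [dif_neg hx]
        obtain ⟨m, rfl⟩ : ∃ m, n = m + 1 := ⟨n - 1, by omega⟩
        have s1 := ih m (by omega) (x-1) (y+1) z (by omega) c hc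
        have s2 := ih (m-1) (by omega) (x-2) (y+2) (z*2) (by omega) _ s1.2
        have s3 := ih (m-2) (by omega) (x-3) (y+3) (z*3) (by omega) _ s2.2
        have hval : (pvGoA (x-1) (y+1) z c).1
            + (pvGoA (x-2) (y+2) (z*2) (pvGoA (x-1) (y+1) z c).2).1
            + (pvGoA (x-3) (y+3) (z*3)
                (pvGoA (x-2) (y+2) (z*2) (pvGoA (x-1) (y+1) z c).2).2).1
            = expensive_seq_alt x y z := by
          rw [s1.1, s2.1, s3.1, alt_rec x y z hx]
        exact ⟨hval, pvValid_insert s3.2 (x, y, z) hval⟩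

-- ===== VERDICT (by name: the statement is the Claim_ definition above) =====
theorem expensive_seq_spec : Claim_equal_expensive_seq := by
  intro x y z _ _
  unfold Spec_expensive_seq expensive_seq
  exact (pvGoA_spec x.toNat x y z rfl ∅
    (fun p v h => by simp at h)).1
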